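-- pv_equiv track=rewrite | github.com/reshinto/algo_flow | src/algorithms/stacks-queues/queue-design/design-circular-deque/sources/design-circular-deque.py | design_circular_deque
-- ===== SOURCE A (Python) =====
-- from typing import List, Optional
--
-- def design_circular_deque(operations: List[str], capacity: int) -> List[str]:
--     buffer: List[Optional[int]] = [None] * capacity  # @step:initialize
--     front_index: int = -1  # @step:initialize
--     rear_index: int = -1  # @step:initialize
--     deque_size: int = 0  # @step:initialize
--     results: List[str] = []  # @step:initialize
--
--     for operation in operations:  # @step:visit
--         if operation.startswith("pushBack"):
--             parts = operation.split(" ")  # @step:enqueue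
--             value = int(parts[1])  # @step:enqueue
--
--             if deque_size == capacity:  # @step:enqueue
--                 results.append("full")  # @step:enqueue
--             else:
--                 if front_index == -1:  # @step:enqueue
--                     front_index = 0  # @step:enqueue
--                 rear_index = (rear_index + 1) % capacity  # @step:enqueue
--                 buffer[rear_index] = value  # @step:enqueue
--                 deque_size += 1  # @step:enqueue
--                 results.append("true")  # @step:enqueue
--
--         elif operation.startswith("pushFront"):
--             parts = operation.split(" ")  # @step:enqueue-front
--             value = int(parts[1])  # @step:enqueue-front
--
--             if deque_size == capacity:  # @step:enqueue-front
--                 results.append("full")  # @step:enqueue-front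
--             else:
--                 if front_index == -1:  # @step:enqueue-front
--                     front_index = 0  # @step:enqueue-front
--                     rear_index = 0  # @step:enqueue-front
--                 else:
--                     front_index = (front_index - 1 + capacity) % capacity  # @step:enqueue-front
--                 buffer[front_index] = value  # @step:enqueue-front
--                 deque_size += 1  # @step:enqueue-front
--                 results.append("true")  # @step:enqueue-front
--
--         elif operation == "popFront":
--             if deque_size == 0:  # @step:dequeue
--                 results.append("empty")  # @step:dequeue
--             else:
--                 popped_value = buffer[front_index]  # @step:dequeue
--                 buffer[front_index] = None  # @step:dequeue
--                 if front_index == rear_index:  # @step:dequeue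
--                     front_index = -1  # @step:dequeue
--                     rear_index = -1  # @step:dequeue
--                 else:
--                     front_index = (front_index + 1) % capacity  # @step:dequeue
--                 deque_size -= 1  # @step:dequeue
--                 results.append(str(popped_value))  # @step:dequeue
--
--         elif operation == "popBack":
--             if deque_size == 0:  # @step:dequeue-rear
--                 results.append("empty")  # @step:dequeue-rear
--             else:
--                 popped_value = buffer[rear_index]  # @step:dequeue-rear
--                 buffer[rear_index] = None  # @step:dequeue-rear
--                 if front_index == rear_index:  # @step:dequeue-rear
--                     front_index = -1  # @step:dequeue-rear
--                     rear_index = -1  # @step:dequeue-rear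
--                 else:
--                     rear_index = (rear_index - 1 + capacity) % capacity  # @step:dequeue-rear
--                 deque_size -= 1  # @step:dequeue-rear
--                 results.append(str(popped_value))  # @step:dequeue-rear
--
--         elif operation == "peekFront":
--             if front_index == -1:  # @step:peek
--                 results.append("empty")  # @step:peek
--             else:
--                 results.append(str(buffer[front_index]))  # @step:peek
--
--         elif operation == "peekRear":
--             if rear_index == -1:  # @step:peek
--                 results.append("empty")  # @step:peek
--             else:
--                 results.append(str(buffer[rear_index]))  # @step:peek
--
--     return results  # @step:complete
-- ===== SOURCE B (Python) =====
-- from typing import List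
--
-- def design_circular_deque(operations: List[str], capacity: int) -> List[str]:
--     # plain Python list as the deque (front at index 0); no circular buffer, no index arithmetic
--     dq: List[int] = []
--     out: List[str] = []
--     for op in operations:
--         if op.startswith("pushBack"):
--             value = int(op.split(" ")[1])
--             if len(dq) == capacity:
--                 out.append("full")
--             else:
--                 dq.append(value)
--                 out.append("true")
--         elif op.startswith("pushFront"):
--             value = int(op.split(" ")[1])
--             if len(dq) == capacity:
--                 out.append("full")
--             else:
--                 dq.insert(0, value)
--                 out.append("true")
--         elif op == "popFront":
--             out.append(str(dq.pop(0)) if dq else "empty")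
--         elif op == "popBack":
--             out.append(str(dq.pop()) if dq else "empty")
--         elif op == "peekFront":
--             out.append(str(dq[0]) if dq else "empty")
--         elif op == "peekRear":
--             out.append(str(dq[-1]) if dq else "empty")
--     return out
-- ===== Notes on version B (the rewrite author's own statement) =====
-- stated objective: idiomatic
-- what changed: B replaces A's fixed-size circular buffer with front/rear modular index arithmetic by a plain list used as a deque (append/prepend, pop/peek at either end), keeping the same operation parsing and the manual length==capacity check.
import Mathlib
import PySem

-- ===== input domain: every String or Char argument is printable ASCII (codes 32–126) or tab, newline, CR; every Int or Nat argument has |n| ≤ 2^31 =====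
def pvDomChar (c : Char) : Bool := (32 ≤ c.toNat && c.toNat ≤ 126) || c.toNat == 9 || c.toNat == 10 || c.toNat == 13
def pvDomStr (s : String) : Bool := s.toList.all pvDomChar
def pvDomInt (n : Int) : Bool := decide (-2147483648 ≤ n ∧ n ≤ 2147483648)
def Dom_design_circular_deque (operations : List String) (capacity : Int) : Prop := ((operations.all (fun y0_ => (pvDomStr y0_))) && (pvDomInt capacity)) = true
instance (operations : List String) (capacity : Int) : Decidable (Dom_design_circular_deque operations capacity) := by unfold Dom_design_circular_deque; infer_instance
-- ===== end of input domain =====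

-- B replaces A's fixed circular buffer with front/rear index arithmetic by a plain list deque
-- (append/prepend/pop at either end); same results, no modular-index logic (objective: idiomatic).


-- ===== PORT A =====
-- value = int(operation.split(" ")[1]); total form (getD 0) — Pre_ excludes the inputs where
-- Python raises here (missing part 1 / ValueError), so the default is never reached under Pre_.
def dcdArg (operation : String) : Int :=
  ((PySem.List.pyGet? ((PySem.Str.split? operation " ").getD []) 1).bind PySem.Int.ofStr?).getD 0

-- str(x) for x : Optional[int]  (str(None) = "None")
def dcdStr (o : Option Int) : String :=
  match o with
  | none => "None"
  | some v => PySem.Int.toStr v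

-- one iteration of A's for-loop; state = (buffer, front_index, rear_index, deque_size, results).
-- buffer reads/writes use the total forms (pyGet? … getD none / pySetD): under Pre_ the indices
-- A actually reaches are in range, so these coincide with Python's buffer[i].
def dcdStepA (capacity : Int) (st : List (Option Int) × Int × Int × Int × List String)
    (operation : String) : List (Option Int) × Int × Int × Int × List String :=
  match st with
  | (buffer, front, rear, size, results) =>
    if PySem.Str.startswith operation "pushBack" then
      let value := dcdArg operation
      if size = capacity then (buffer, front, rear, size, results ++ ["full"])
      else
        let front' := if front = -1 then 0 else front
        let rear' := PySem.Int.mod (rear + 1) capacity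
        (PySem.List.pySetD buffer rear' (some value), front', rear', size + 1, results ++ ["true"])
    else if PySem.Str.startswith operation "pushFront" then
      let value := dcdArg operation
      if size = capacity then (buffer, front, rear, size, results ++ ["full"])
      else
        let fr' : Int × Int :=
          if front = -1 then (0, 0)
          else (PySem.Int.mod (front - 1 + capacity) capacity, rear)
        (PySem.List.pySetD buffer fr'.1 (some value), fr'.1, fr'.2, size + 1, results ++ ["true"])
    else if operation = "popFront" then
      if size = 0 then (buffer, front, rear, size, results ++ ["empty"])
      else
        let popped := (PySem.List.pyGet? buffer front).getD none
        let buffer' := PySem.List.pySetD buffer front none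
        let fr' : Int × Int :=
          if front = rear then (-1, -1) else (PySem.Int.mod (front + 1) capacity, rear)
        (buffer', fr'.1, fr'.2, size - 1, results ++ [dcdStr popped])
    else if operation = "popBack" then
      if size = 0 then (buffer, front, rear, size, results ++ ["empty"])
      else
        let popped := (PySem.List.pyGet? buffer rear).getD none
        let buffer' := PySem.List.pySetD buffer rear none
        let fr' : Int × Int :=
          if front = rear then (-1, -1) else (front, PySem.Int.mod (rear - 1 + capacity) capacity)
        (buffer', fr'.1, fr'.2, size - 1, results ++ [dcdStr popped])
    else if operation = "peekFront" then
      if front = -1 then (buffer, front, rear, size, results ++ ["empty"])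
      else (buffer, front, rear, size, results ++ [dcdStr ((PySem.List.pyGet? buffer front).getD none)])
    else if operation = "peekRear" then
      if rear = -1 then (buffer, front, rear, size, results ++ ["empty"])
      else (buffer, front, rear, size, results ++ [dcdStr ((PySem.List.pyGet? buffer rear).getD none)])
    else (buffer, front, rear, size, results)

def design_circular_deque (operations : List String) (capacity : Int) : List String :=
  -- buffer = [None] * capacity (empty for capacity ≤ 0), front = rear = -1, size = 0, results = []
  (operations.foldl (dcdStepA capacity) (List.replicate capacity.toNat none, -1, -1, 0, [])).2.2.2.2

-- ===== PORT B =====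
-- one iteration of B's loop; state = (dq, out): the deque is a plain list, front at its head.
def dcdStepB (capacity : Int) (st : List Int × List String) (op : String) :
    List Int × List String :=
  match st with
  | (dq, out) =>
    if PySem.Str.startswith op "pushBack" then
      let value := dcdArg op
      if (dq.length : Int) = capacity then (dq, out ++ ["full"])
      else (dq ++ [value], out ++ ["true"])
    else if PySem.Str.startswith op "pushFront" then
      let value := dcdArg op
      if (dq.length : Int) = capacity then (dq, out ++ ["full"])
      else (value :: dq, out ++ ["true"])
    else if op = "popFront" then
      match dq with
      | [] => (dq, out ++ ["empty"])
      | x :: rest => (rest, out ++ [PySem.Int.toStr x])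
    else if op = "popBack" then
      match dq.getLast? with
      | none => (dq, out ++ ["empty"])
      | some x => (dq.dropLast, out ++ [PySem.Int.toStr x])
    else if op = "peekFront" then
      (dq, out ++ [match dq.head? with | none => "empty" | some x => PySem.Int.toStr x])
    else if op = "peekRear" then
      (dq, out ++ [match dq.getLast? with | none => "empty" | some x => PySem.Int.toStr x])
    else (dq, out)

def design_circular_deque_alt (operations : List String) (capacity : Int) : List String :=
  (operations.foldl (dcdStepB capacity) ([], [])).2

-- ===== PRECONDITION & SPEC =====
-- Pre_ excludes exactly the inputs on which A raises: a push operation whose argument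
-- int(op.split(" ")[1]) is missing or not a valid int literal (IndexError/ValueError), and a push
-- operation executed with negative capacity (its buffer write then hits the empty buffer:
-- IndexError). Everything A returns on is inside Pre_.
def Pre_design_circular_deque (operations : List String) (capacity : Int) : Prop :=
  ∀ op ∈ operations,
    (PySem.Str.startswith op "pushBack" = true ∨ PySem.Str.startswith op "pushFront" = true) →
      0 ≤ capacity ∧
      ((PySem.List.pyGet? ((PySem.Str.split? op " ").getD []) 1).bind PySem.Int.ofStr?).isSome = true
instance (operations : List String) (capacity : Int) :
    Decidable (Pre_design_circular_deque operations capacity) := by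
  unfold Pre_design_circular_deque; infer_instance

def pvWitness_design_circular_deque : List String × Int :=
  (["pushBack 1", "pushFront 2", "peekRear", "popFront", "popBack", "popFront"], 2)

def Spec_design_circular_deque (operations : List String) (capacity : Int) (out : List String) : Prop := out = design_circular_deque_alt operations capacity
instance (operations : List String) (capacity : Int) (out : List String) : Decidable (Spec_design_circular_deque operations capacity out) := by unfold Spec_design_circular_deque; infer_instance

-- ===== CLAIM (what is proved, stated in full; the proofs are below) =====
def Claim_equal_design_circular_deque : Prop := ∀ (operations : List String) (capacity : Int), Dom_design_circular_deque operations capacity → Pre_design_circular_deque operations capacity → Spec_design_circular_deque operations capacity (design_circular_deque operations capacity)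

-- ===== LEMMAS AND PROOFS =====

-- invariant tying A's circular-buffer state to B's plain deque dq
def dcdInv (cap : Int) (buffer : List (Option Int)) (front rear : Int) (dq : List Int) : Prop :=
  buffer.length = cap.toNat ∧ (dq.length : Int) ≤ max cap 0 ∧
  (dq = [] → front = -1 ∧ rear = -1) ∧
  (dq ≠ [] →
    0 ≤ front ∧ front < cap ∧ rear = (front + dq.length - 1) % cap ∧
    ∀ k : Nat, (h : k < dq.length) →
      buffer[((front + (k : Int)) % cap).toNat]? = some (some dq[k]))

def dcdRel (cap : Int) (a : List (Option Int) × Int × Int × Int × List String)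
    (b : List Int × List String) : Prop :=
  a.2.2.2.2 = b.2 ∧ a.2.2.2.1 = (b.1.length : Int) ∧ dcdInv cap a.1 a.2.1 a.2.2.1 b.1

lemma dcd_emod_shift (a b c : Int) : (a % c + b) % c = (a + b) % c := by
  rw [Int.add_emod, Int.emod_emod_of_dvd a dvd_rfl, ← Int.add_emod]

lemma dcd_emod_drop (a c : Int) : (a + c) % c = a % c := (Int.emod_eq_add_self_emod).symm

lemma dcd_window_ne {c : Int} (x i j : Int) (hij : i < j) (hjc : j - i < c) :
    (x + i) % c ≠ (x + j) % c := by
  intro h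
  replace h := h.symm
  rw [Int.emod_eq_emod_iff_emod_sub_eq_zero] at h
  have e : x + j - (x + i) = j - i := by ring
  rw [e, Int.emod_eq_of_lt (by omega) (by omega)] at h
  omega

lemma dcd_window_ne_nat {c : Int} (hc : 0 < c) (x i j : Int) (hij : i < j) (hjc : j - i < c) :
    ((x + i) % c).toNat ≠ ((x + j) % c).toNat := by
  have h1 := Int.emod_nonneg (x + i) (by omega : c ≠ 0)
  have h2 := Int.emod_nonneg (x + j) (by omega : c ≠ 0)
  intro h
  exact dcd_window_ne x i j hij hjc (by omega)

lemma dcdStep_rel (cap : Int) (op : String)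
    (a : List (Option Int) × Int × Int × Int × List String) (b : List Int × List String)
    (hop : (PySem.Str.startswith op "pushBack" = true ∨ PySem.Str.startswith op "pushFront" = true) →
      0 ≤ cap ∧ ((PySem.List.pyGet? ((PySem.Str.split? op " ").getD []) 1).bind PySem.Int.ofStr?).isSome = true)
    (h : dcdRel cap a b) : dcdRel cap (dcdStepA cap a op) (dcdStepB cap b op) := by
  obtain ⟨buf, f, r, size, res⟩ := a
  obtain ⟨dq, out⟩ := b
  obtain ⟨hres, hsize, hlenbuf, hmax, hemp, hne⟩ := h
  simp only at hres hsize hlenbuf hmax hemp hne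
  subst hres hsize
  by_cases hpb : PySem.Str.startswith op "pushBack" = true
  · obtain ⟨hcap, -⟩ := hop (Or.inl hpb)
    by_cases hfull : (dq.length : Int) = cap
    · simp only [dcdStepA, dcdStepB, hpb, hfull, if_pos, Bool.false_eq_true, ite_self]
      exact ⟨rfl, hfull.symm, hlenbuf, hmax, hemp, hne⟩
    · have hlt : (dq.length : Int) < cap := by
        have : max cap 0 = cap := max_eq_left hcap
        omega
      have hcpos : 0 < cap := by omega
      cases dq with
      | nil =>
        obtain ⟨hf, hr⟩ := hemp rfl
        subst hf hr
        simp only [dcdStepA, dcdStepB, hpb, hfull, Bool.false_eq_true, if_false,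
          List.length_nil, Nat.cast_zero, reduceIte]
        have h0 : ¬(0 : Int) = cap := by omega
        have hbl : 0 < buf.length := by omega
        rw [show (-1 + 1 : Int) = 0 by ring, PySem.Int.mod_eq_emod_of_pos hcpos, Int.zero_emod]
        simp only [h0, if_false]
        rw [PySem.List.pySetD_of_nonneg buf (some (dcdArg op)) le_rfl]
        refine ⟨rfl, by simp, by simp [hlenbuf], by simp; omega, by simp, ?_⟩
        intro _
        refine ⟨le_rfl, hcpos, by simp, ?_⟩
        intro k hk
        have hk0 : k = 0 := by simpa using hk
        subst hk0
        simpa using List.getElem?_set_self (l := buf) (a := some (dcdArg op)) (by simpa using hbl)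
      | cons x rest =>
        obtain ⟨hf0, hfc, hr, hslots⟩ := hne (by simp)
        simp only [dcdStepA, dcdStepB, hpb, reduceIte, if_neg hfull]
        have hfne : ¬ f = -1 := by omega
        have hmod : PySem.Int.mod (r + 1) cap = (f + ((x :: rest).length : Int)) % cap := by
          rw [PySem.Int.mod_eq_emod_of_pos hcpos, hr, dcd_emod_shift,
            show f + ((x :: rest).length : Int) - 1 + 1 = f + ((x :: rest).length : Int) by ring]
        have hnn : 0 ≤ (f + ((x :: rest).length : Int)) % cap := Int.emod_nonneg _ (by omega)
        have hltc : (f + ((x :: rest).length : Int)) % cap < cap := Int.emod_lt_of_pos _ hcpos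
        rw [hmod, PySem.List.pySetD_of_nonneg _ _ hnn, if_neg hfne]
        refine ⟨rfl, by simp, by simp [hlenbuf],
          by rw [show ((x :: rest) ++ [dcdArg op]).length = (x :: rest).length + 1 by simp];
             push_cast; omega,
          by simp, ?_⟩
        intro _
        refine ⟨hf0, hfc, ?_, ?_⟩
        · rw [show f + (((x :: rest) ++ [dcdArg op]).length : Int) - 1
              = f + ((x :: rest).length : Int) by
            simp only [List.length_append, List.length_cons, List.length_nil]; push_cast; ring]
        · intro k hk
          have hk' : k < (x :: rest).length + 1 := by simpa using hk
          rcases Nat.lt_succ_iff_lt_or_eq.mp hk' with hk2 | hk2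
          · rw [List.getElem?_set_ne
              (dcd_window_ne_nat hcpos f (k : Int) ((x :: rest).length : Int)
                (by exact_mod_cast hk2) (by omega)).symm]
            rw [hslots k hk2]
            congr 2
            exact (List.getElem_append_left hk2).symm
          · subst hk2
            rw [List.getElem?_set_self (by omega)]
            congr 2
            exact (List.getElem_concat_length rfl (by simpa using hk)).symm
  · by_cases hpf : PySem.Str.startswith op "pushFront" = true
    · obtain ⟨hcap, -⟩ := hop (Or.inr hpf)
      by_cases hfull : (dq.length : Int) = cap
      · simp only [dcdStepA, dcdStepB, hpb, hpf, hfull, if_pos, Bool.false_eq_true, if_false,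
          ite_self]
        exact ⟨rfl, hfull.symm, hlenbuf, hmax, hemp, hne⟩
      · have hlt : (dq.length : Int) < cap := by
          have : max cap 0 = cap := max_eq_left hcap
          omega
        have hcpos : 0 < cap := by omega
        cases dq with
        | nil =>
          obtain ⟨hf, hr⟩ := hemp rfl
          subst hf hr
          simp only [dcdStepA, dcdStepB, hpb, hpf, hfull, Bool.false_eq_true, if_false,
            List.length_nil, Nat.cast_zero, reduceIte]
          have h0 : ¬(0 : Int) = cap := by omega
          have hbl : 0 < buf.length := by omega
          simp only [h0, if_false]
          rw [PySem.List.pySetD_of_nonneg buf (some (dcdArg op)) le_rfl]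
          refine ⟨rfl, by simp, by simp [hlenbuf], by simp; omega, by simp, ?_⟩
          intro _
          refine ⟨le_rfl, hcpos, by simp, ?_⟩
          intro k hk
          have hk0 : k = 0 := by simpa using hk
          subst hk0
          simpa using List.getElem?_set_self (l := buf) (a := some (dcdArg op)) (by simpa using hbl)
        | cons x rest =>
          obtain ⟨hf0, hfc, hr, hslots⟩ := hne (by simp)
          simp only [dcdStepA, dcdStepB, hpb, hpf, Bool.false_eq_true, if_false, reduceIte,
            if_neg hfull]
          have hfne : ¬ f = -1 := by omega
          rw [if_neg hfne]
          have hm : PySem.Int.mod (f - 1 + cap) cap = (f - 1 + cap) % cap :=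
            PySem.Int.mod_eq_emod_of_pos hcpos
          simp only [hm]
          have hnnf : 0 ≤ (f - 1 + cap) % cap := Int.emod_nonneg _ (by omega)
          have hltf : (f - 1 + cap) % cap < cap := Int.emod_lt_of_pos _ hcpos
          have hFk : ∀ b : Int, ((f - 1 + cap) % cap + b) % cap = (f - 1 + b) % cap := by
            intro b
            rw [dcd_emod_shift, show f - 1 + cap + b = f - 1 + b + cap by ring, dcd_emod_drop]
          rw [PySem.List.pySetD_of_nonneg _ _ hnnf]
          refine ⟨rfl, by simp, by simp [hlenbuf],
            by rw [show (dcdArg op :: x :: rest).length = (x :: rest).length + 1 by simp];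
               push_cast; omega,
            by simp, ?_⟩
          intro _
          refine ⟨hnnf, hltf, ?_, ?_⟩
          · rw [show (f - 1 + cap) % cap + ((dcdArg op :: x :: rest).length : Int) - 1
                  = (f - 1 + cap) % cap + ((x :: rest).length : Int) by
                simp only [List.length_cons]; push_cast; ring,
              hFk, show f - 1 + ((x :: rest).length : Int)
                  = f + ((x :: rest).length : Int) - 1 by ring]
            exact hr
          · intro k hk
            cases k with
            | zero =>
              simp only [Nat.cast_zero, add_zero, Int.emod_eq_of_lt hnnf hltf,
                List.getElem_cons_zero]
              rw [List.getElem?_set_self (by omega)]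
            | succ k0 =>
              have hk0 : k0 < (x :: rest).length := by simpa using hk
              have hidx : ((f - 1 + cap) % cap + ((k0 + 1 : Nat) : Int)) % cap
                  = (f + (k0 : Int)) % cap := by
                rw [hFk, show f - 1 + ((k0 + 1 : Nat) : Int) = f + (k0 : Int) by push_cast; ring]
              have hsetne : ((f - 1 + cap) % cap).toNat
                  ≠ (((f - 1 + cap) % cap + ((k0 + 1 : Nat) : Int)) % cap).toNat := by
                have h0 := dcd_window_ne_nat hcpos ((f - 1 + cap) % cap) 0 ((k0 + 1 : Nat) : Int)
                  (by push_cast; omega) (by push_cast; omega)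
                simpa [Int.emod_eq_of_lt hnnf hltf] using h0
              rw [List.getElem?_set_ne hsetne, hidx, hslots k0 hk0]
              simp
    · by_cases hpop : op = "popFront"
      · cases dq with
        | nil =>
          obtain ⟨hf, hr⟩ := hemp rfl
          subst hf hr
          simp only [dcdStepA, dcdStepB, hpb, hpf, Bool.false_eq_true, if_false, hpop, reduceIte,
            List.length_nil, Nat.cast_zero, List.head?_nil, List.getLast?_nil]
          exact ⟨rfl, rfl, hlenbuf, hmax, hemp, hne⟩
        | cons x rest =>
          obtain ⟨hf0, hfc, hr, hslots⟩ := hne (by simp)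
          have hcpos : 0 < cap := by omega
          have hreadF : (PySem.List.pyGet? buf f).getD none = some x := by
            have h0 := hslots 0 (by simp)
            rw [Nat.cast_zero, add_zero, Int.emod_eq_of_lt hf0 hfc] at h0
            rw [PySem.List.pyGet?_of_nonneg buf hf0, h0]
            rfl
          cases rest with
          | nil =>
            have hfr : f = r := by
              rw [hr, show f + (([x] : List Int).length : Int) - 1 = f by simp,
                Int.emod_eq_of_lt hf0 hfc]
            simp only [dcdStepA, dcdStepB, hpb, hpf, Bool.false_eq_true, if_false]
            simp only [hpop, reduceIte]
            rw [if_neg (by simp : ¬ (([x] : List Int).length : Int) = 0), if_pos hfr, hreadF]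
            exact ⟨rfl, by simp, by simp [hlenbuf], by simp, by simp, by simp⟩
          | cons y t =>
            have hfr : ¬ f = r := by
              intro h
              apply dcd_window_ne (c := cap) f 0 (((x :: y :: t).length : Int) - 1)
                (by simp only [List.length_cons]; push_cast; omega)
                (by have : max cap 0 = cap := max_eq_left (by omega); omega)
              rw [add_zero, Int.emod_eq_of_lt hf0 hfc,
                show f + (((x :: y :: t).length : Int) - 1)
                  = f + ((x :: y :: t).length : Int) - 1 by ring, ← hr]
              exact h
            simp only [dcdStepA, dcdStepB, hpb, hpf, Bool.false_eq_true, if_false]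
            simp only [hpop, reduceIte]
            rw [if_neg (by simp only [List.length_cons]; push_cast; omega :
                ¬ (((x :: y :: t) : List Int).length : Int) = 0),
              if_neg hfr, hreadF, PySem.Int.mod_eq_emod_of_pos hcpos,
              PySem.List.pySetD_of_nonneg _ _ hf0]
            have hnnf : 0 ≤ (f + 1) % cap := Int.emod_nonneg _ (by omega)
            have hltf : (f + 1) % cap < cap := Int.emod_lt_of_pos _ hcpos
            refine ⟨rfl, by simp, by simp [hlenbuf],
              by simp only [List.length_cons] at hmax ⊢; push_cast at hmax ⊢; omega,
              by simp, ?_⟩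
            intro _
            refine ⟨hnnf, hltf, ?_, ?_⟩
            · rw [show (f + 1) % cap + (((y :: t) : List Int).length : Int) - 1
                    = (f + 1) % cap + ((((y :: t) : List Int).length : Int) - 1) by ring,
                dcd_emod_shift,
                show f + 1 + ((((y :: t) : List Int).length : Int) - 1)
                    = f + ((x :: y :: t).length : Int) - 1 by
                  simp only [List.length_cons]; push_cast; ring]
              exact hr
            · intro k hk
              have hk1 : k + 1 < (x :: y :: t).length := by
                simp only [List.length_cons] at hk ⊢; omega
              have hidx : ((f + 1) % cap + (k : Int)) % cap = (f + ((k + 1 : Nat) : Int)) % cap := by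
                rw [dcd_emod_shift, show f + 1 + (k : Int) = f + ((k + 1 : Nat) : Int) by
                  push_cast; ring]
              have hsetne : f.toNat ≠ (((f + 1) % cap + (k : Int)) % cap).toNat := by
                have h0 := dcd_window_ne_nat hcpos f 0 ((k + 1 : Nat) : Int)
                  (by push_cast; omega)
                  (by simp only [List.length_cons] at hk1 hmax
                      have : max cap 0 = cap := max_eq_left (by omega)
                      push_cast; omega)
                rw [hidx]
                simpa [Int.emod_eq_of_lt hf0 hfc] using h0
              rw [List.getElem?_set_ne hsetne, hidx, hslots (k + 1) hk1]
              simp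
      · by_cases hpop2 : op = "popBack"
        · cases dq with
          | nil =>
            obtain ⟨hf, hr⟩ := hemp rfl
            subst hf hr
            simp only [dcdStepA, dcdStepB, hpb, hpf, Bool.false_eq_true, if_false, hpop, hpop2, reduceIte,
              List.length_nil, Nat.cast_zero, List.head?_nil, List.getLast?_nil]
            exact ⟨rfl, rfl, hlenbuf, hmax, hemp, hne⟩
          | cons x rest =>
            obtain ⟨hf0, hfc, hr, hslots⟩ := hne (by simp)
            have hcpos : 0 < cap := by omega
            have hreadF : (PySem.List.pyGet? buf f).getD none = some x := by
              have h0 := hslots 0 (by simp)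
              rw [Nat.cast_zero, add_zero, Int.emod_eq_of_lt hf0 hfc] at h0
              rw [PySem.List.pyGet?_of_nonneg buf hf0, h0]
              rfl
            have hrnn : 0 ≤ r := by rw [hr]; exact Int.emod_nonneg _ (by omega)
            cases rest with
            | nil =>
              have hfr : f = r := by
                rw [hr, show f + (([x] : List Int).length : Int) - 1 = f by simp,
                  Int.emod_eq_of_lt hf0 hfc]
              simp only [dcdStepA, dcdStepB, hpb, hpf, hpop, Bool.false_eq_true, if_false]
              simp only [hpop2, reduceIte, List.getLast?_singleton]
              rw [if_neg (by simp : ¬ (([x] : List Int).length : Int) = 0), if_pos hfr, ← hfr,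
                hreadF]
              exact ⟨rfl, by simp, by simp [hlenbuf], by simp, by simp, by simp⟩
            | cons y t =>
              have hfr : ¬ f = r := by
                intro h
                apply dcd_window_ne (c := cap) f 0 (((x :: y :: t).length : Int) - 1)
                  (by simp only [List.length_cons]; push_cast; omega)
                  (by have : max cap 0 = cap := max_eq_left (by omega); omega)
                rw [add_zero, Int.emod_eq_of_lt hf0 hfc,
                  show f + (((x :: y :: t).length : Int) - 1)
                    = f + ((x :: y :: t).length : Int) - 1 by ring, ← hr]
                exact h
              have hreadR : (PySem.List.pyGet? buf r).getD none
                  = some ((x :: y :: t)[(y :: t).length]'(by simp)) := by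
                have h0 := hslots (y :: t).length (by simp)
                rw [show f + (((y :: t).length : Nat) : Int)
                    = f + ((x :: y :: t).length : Int) - 1 by
                  simp only [List.length_cons]; push_cast; ring, ← hr] at h0
                rw [PySem.List.pyGet?_of_nonneg buf hrnn, h0]
                rfl
              have hgl : (x :: y :: t).getLast?
                  = some ((x :: y :: t)[(x :: y :: t).length - 1]'(by simp)) := by
                rw [List.getLast?_eq_getElem?, List.getElem?_eq_getElem (by simp)]
              simp only [dcdStepA, dcdStepB, hpb, hpf, hpop, Bool.false_eq_true, if_false]
              simp only [hpop2, reduceIte, hgl]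
              rw [if_neg (by simp only [List.length_cons]; push_cast; omega :
                  ¬ (((x :: y :: t) : List Int).length : Int) = 0),
                if_neg hfr, hreadR, PySem.Int.mod_eq_emod_of_pos hcpos,
                PySem.List.pySetD_of_nonneg _ _ hrnn]
              have hnnr : 0 ≤ (r - 1 + cap) % cap := Int.emod_nonneg _ (by omega)
              have hltr : (r - 1 + cap) % cap < cap := Int.emod_lt_of_pos _ hcpos
              refine ⟨rfl, by simp, by simp [hlenbuf],
                by rw [show (x :: y :: t).dropLast.length = (y :: t).length by simp]
                   simp only [List.length_cons] at hmax ⊢; push_cast at hmax ⊢; omega,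
                by simp, ?_⟩
              intro _
              refine ⟨hf0, hfc, ?_, ?_⟩
              · rw [hr, show (f + ((x :: y :: t).length : Int) - 1) % cap - 1 + cap
                      = (f + ((x :: y :: t).length : Int) - 1) % cap + (cap - 1) by ring,
                  dcd_emod_shift,
                  show f + ((x :: y :: t).length : Int) - 1 + (cap - 1)
                      = (f + ((x :: y :: t).length : Int) - 2) + cap by ring,
                  dcd_emod_drop,
                  show f + (((x :: y :: t).dropLast).length : Int) - 1
                      = f + ((x :: y :: t).length : Int) - 2 by
                    rw [show (x :: y :: t).dropLast.length = (y :: t).length by simp]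
                    simp only [List.length_cons]; push_cast; ring]
              · intro k hk
                have hky : k < (y :: t).length := by
                  rw [show (x :: y :: t).dropLast.length = (y :: t).length by simp] at hk
                  exact hk
                have hkn : k < (x :: y :: t).length := by
                  simp only [List.length_cons] at hky ⊢; omega
                have hsetne : r.toNat ≠ ((f + (k : Int)) % cap).toNat := by
                  rw [hr, show f + ((x :: y :: t).length : Int) - 1
                      = f + (((y :: t).length : Nat) : Int) by
                    simp only [List.length_cons]; push_cast; ring]
                  exact (dcd_window_ne_nat hcpos f (k : Int) (((y :: t).length : Nat) : Int)
                    (by exact_mod_cast hky)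
                    (by have : max cap 0 = cap := max_eq_left (by omega)
                        simp only [List.length_cons] at hmax ⊢; push_cast at hmax ⊢; omega)).symm
                rw [List.getElem?_set_ne hsetne, hslots k hkn]
                simp only [List.getElem_dropLast]
        · by_cases hpk1 : op = "peekFront"
          · cases dq with
            | nil =>
              obtain ⟨hf, hr⟩ := hemp rfl
              subst hf hr
              simp only [dcdStepA, dcdStepB, hpb, hpf, Bool.false_eq_true, if_false, hpop, hpop2, hpk1, reduceIte,
                List.length_nil, Nat.cast_zero, List.head?_nil, List.getLast?_nil]
              exact ⟨rfl, rfl, hlenbuf, hmax, hemp, hne⟩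
            | cons x rest =>
              obtain ⟨hf0, hfc, hr, hslots⟩ := hne (by simp)
              have hcpos : 0 < cap := by omega
              have hreadF : (PySem.List.pyGet? buf f).getD none = some x := by
                have h0 := hslots 0 (by simp)
                rw [Nat.cast_zero, add_zero, Int.emod_eq_of_lt hf0 hfc] at h0
                rw [PySem.List.pyGet?_of_nonneg buf hf0, h0]
                rfl
              simp only [dcdStepA, dcdStepB, hpb, hpf, hpop, hpop2, Bool.false_eq_true, if_false]
              simp only [hpk1, reduceIte, List.head?_cons]
              rw [if_neg (show ¬ f = -1 by omega), hreadF]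
              exact ⟨rfl, rfl, hlenbuf, hmax, hemp, hne⟩
          · by_cases hpk2 : op = "peekRear"
            · cases dq with
              | nil =>
                obtain ⟨hf, hr⟩ := hemp rfl
                subst hf hr
                simp only [dcdStepA, dcdStepB, hpb, hpf, Bool.false_eq_true, if_false, hpop, hpop2, hpk1, hpk2, reduceIte,
                  List.length_nil, Nat.cast_zero, List.head?_nil, List.getLast?_nil]
                exact ⟨rfl, rfl, hlenbuf, hmax, hemp, hne⟩
              | cons x rest =>
                obtain ⟨hf0, hfc, hr, hslots⟩ := hne (by simp)
                have hcpos : 0 < cap := by omega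
                have hrnn : 0 ≤ r := by rw [hr]; exact Int.emod_nonneg _ (by omega)
                have hreadR : (PySem.List.pyGet? buf r).getD none
                    = some ((x :: rest)[rest.length]'(by simp)) := by
                  have h0 := hslots rest.length (by simp)
                  rw [show f + ((rest.length : Nat) : Int)
                      = f + ((x :: rest).length : Int) - 1 by
                    simp only [List.length_cons]; push_cast; ring, ← hr] at h0
                  rw [PySem.List.pyGet?_of_nonneg buf hrnn, h0]
                  rfl
                have hgl : (x :: rest).getLast?
                    = some ((x :: rest)[(x :: rest).length - 1]'(by simp)) := by
                  rw [List.getLast?_eq_getElem?, List.getElem?_eq_getElem (by simp)]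
                simp only [dcdStepA, dcdStepB, hpb, hpf, hpop, hpop2, hpk1, Bool.false_eq_true,
                  if_false]
                simp only [hpk2, reduceIte, hgl]
                rw [if_neg (show ¬ r = -1 by omega), hreadR]
                exact ⟨rfl, rfl, hlenbuf, hmax, hemp, hne⟩
            · simp only [dcdStepA, dcdStepB, hpb, hpf, hpop, hpop2, hpk1, hpk2, if_false,
                Bool.false_eq_true, ite_self]
              exact ⟨rfl, rfl, hlenbuf, hmax, hemp, hne⟩

-- ===== VERDICT (by name: the statement is the Claim_ definition above) =====
theorem design_circular_deque_spec : Claim_equal_design_circular_deque := by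
  intro operations capacity _ hpre
  unfold Spec_design_circular_deque design_circular_deque design_circular_deque_alt
  suffices h : dcdRel capacity
      (operations.foldl (dcdStepA capacity) (List.replicate capacity.toNat none, -1, -1, 0, []))
      (operations.foldl (dcdStepB capacity) ([], [])) by
    exact h.1
  have main : ∀ (ops : List String) a b,
      (∀ op ∈ ops, (PySem.Str.startswith op "pushBack" = true ∨ PySem.Str.startswith op "pushFront" = true) →
        0 ≤ capacity ∧ ((PySem.List.pyGet? ((PySem.Str.split? op " ").getD []) 1).bind PySem.Int.ofStr?).isSome = true) →
      dcdRel capacity a b →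
      dcdRel capacity (ops.foldl (dcdStepA capacity) a) (ops.foldl (dcdStepB capacity) b) := by
    intro ops
    induction ops with
    | nil => intro a b _ hr; exact hr
    | cons o t ih =>
      intro a b hp hr
      exact ih _ _ (fun x hx => hp x (List.mem_cons_of_mem _ hx))
        (dcdStep_rel capacity o a b (hp o (List.mem_cons_self)) hr)
  refine main operations _ _ hpre ?_
  refine ⟨rfl, rfl, by simp, by positivity, by simp, by simp⟩
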